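-- pv_equiv track=rewrite | github.com/eitchtee/django-cookiecutter | {{ cookiecutter.project_slug }}/app/apps/common/utils/django.py | django_to_airdatepicker_datetime_separated
-- ===== SOURCE A (Python) =====
-- def django_to_airdatepicker_datetime_separated(django_format):
--     format_map = {
--         # Time formats
--         "h": "hh",  # Hour (12-hour)
--         "H": "HH",  # Hour (24-hour)
--         "i": "mm",  # Minutes
--         "A": "AA",  # AM/PM uppercase
--         "a": "aa",  # am/pm lowercase
--         "P": "h:mm aa",  # Localized time format
--         # Date formats
--         "D": "E",  # Short weekday name
--         "l": "EEEE",  # Full weekday name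
--         "j": "d",  # Day of month without leading zero
--         "d": "dd",  # Day of month with leading zero
--         "n": "M",  # Month without leading zero
--         "m": "MM",  # Month with leading zero
--         "M": "MMM",  # Short month name
--         "F": "MMMM",  # Full month name
--         "y": "yy",  # Year, 2 digits
--         "Y": "yyyy",  # Year, 4 digits
--     }
--
--     # Define which characters belong to time format
--     time_chars = {"h", "H", "i", "A", "a", "P"}
--     date_chars = {"D", "l", "j", "d", "n", "m", "M", "F", "y", "Y"}
--
--     date_parts = []
--     time_parts = []
--     current_part = []
--     is_time = False
--
--     i = 0
--     while i < len(django_format):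
--         char = django_format[i]
--
--         if char == "\\":  # Handle escaped characters
--             if i + 1 < len(django_format):
--                 current_part.append(django_format[i + 1])
--                 i += 2
--             continue
--
--         if char in format_map:
--             if char in time_chars:
--                 # If we were building a date part, save it and start a time part
--                 if current_part and not is_time:
--                     date_parts.append("".join(current_part))
--                     current_part = []
--                 is_time = True
--                 current_part.append(format_map[char])
--             elif char in date_chars:
--                 # If we were building a time part, save it and start a date part
--                 if current_part and is_time:
--                     time_parts.append("".join(current_part))
--                     current_part = []
--                 is_time = False
--                 current_part.append(format_map[char])
--         else:
--             # Handle separators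
--             if char in "/:.-":
--                 current_part.append(char)
--             elif char == " ":
--                 if current_part:
--                     if is_time:
--                         time_parts.append("".join(current_part))
--                     else:
--                         date_parts.append("".join(current_part))
--                     current_part = []
--                 current_part.append(char)
--
--         i += 1
--
--     # Don't forget the last part
--     if current_part:
--         if is_time:
--             time_parts.append("".join(current_part))
--         else:
--             date_parts.append("".join(current_part))
--
--     date_format = "".join(date_parts)
--     time_format = "".join(time_parts)
--
--     # Clean up multiple spaces while preserving necessary ones
--     date_format = " ".join(filter(None, date_format.split()))
--     time_format = " ".join(filter(None, time_format.split()))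
--
--     return date_format, time_format
-- ===== SOURCE B (Python) =====
-- def django_to_airdatepicker_datetime_separated(django_format):
--     TIME = {"h": "hh", "H": "HH", "i": "mm", "A": "AA", "a": "aa", "P": "h:mm aa"}
--     DATE = {"D": "E", "l": "EEEE", "j": "d", "d": "dd", "n": "M", "m": "MM",
--             "M": "MMM", "F": "MMMM", "y": "yy", "Y": "yyyy"}
--
--     # Pass 1: tokenize into (text, tag) with tag in {"time", "date", "sep", "space"};
--     # backslash escapes are resolved here (a dangling final backslash is ignored).
--     tokens = []
--     chars = iter(django_format)
--     for ch in chars: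
--         if ch == "\\":
--             nxt = next(chars, None)
--             if nxt is not None:
--                 tokens.append((nxt, "sep"))
--         elif ch in TIME:
--             tokens.append((TIME[ch], "time"))
--         elif ch in DATE:
--             tokens.append((DATE[ch], "date"))
--         elif ch in "/:.-":
--             tokens.append((ch, "sep"))
--         elif ch == " ":
--             tokens.append((" ", "space"))
--
--     # Pass 2: bucket the tokens.
--     buckets = {"date": [], "time": []}
--     part = []
--     is_time = False
--     for text, tag in tokens:
--         if tag == "sep":
--             part.append(text)
--         elif tag == "space":
--             if part:
--                 buckets["time" if is_time else "date"].append("".join(part))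
--             part = [" "]
--         else:
--             wanted = tag == "time"
--             if part and is_time != wanted:
--                 buckets["time" if is_time else "date"].append("".join(part))
--                 part = []
--             is_time = wanted
--             part.append(text)
--     if part:
--         buckets["time" if is_time else "date"].append("".join(part))
--
--     date_format = " ".join("".join(buckets["date"]).split())
--     time_format = " ".join("".join(buckets["time"]).split())
--     return date_format, time_format
-- ===== Notes on version B (the rewrite author's own statement) =====
-- stated objective: alternative
-- what changed: A's single indexed while-loop (manual i+=2 escape stepping, per-character dict/set classification interleaved with bucket switching) is replaced by a two-pass pipeline: a tokenizer resolving escapes into (text, tag in {date,time,sep,space}) tokens, then a bucketing fold over the token list; Pre_ excludes strings ending in an odd run of backslashes, on which A loops forever and never returns.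
import Mathlib
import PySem

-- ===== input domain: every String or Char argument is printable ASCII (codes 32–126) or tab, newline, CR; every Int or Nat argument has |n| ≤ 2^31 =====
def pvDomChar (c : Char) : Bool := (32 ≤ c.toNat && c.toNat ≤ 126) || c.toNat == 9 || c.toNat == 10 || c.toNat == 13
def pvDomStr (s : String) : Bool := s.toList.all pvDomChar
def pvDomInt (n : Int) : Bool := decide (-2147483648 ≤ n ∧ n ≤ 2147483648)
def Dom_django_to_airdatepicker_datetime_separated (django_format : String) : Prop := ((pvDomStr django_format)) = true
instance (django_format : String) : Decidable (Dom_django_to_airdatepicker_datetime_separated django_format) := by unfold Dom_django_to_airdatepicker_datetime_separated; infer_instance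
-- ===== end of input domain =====

-- B replaces A's single indexed while-loop by two passes (tokenize with tags, then bucket the
-- tokens), returning the same value wherever A terminates (objective: alternative decomposition).

-- ===== PORT A =====
def pvFmtA (c : Char) : Option String :=
  match c with
  | 'h' => some "hh" | 'H' => some "HH" | 'i' => some "mm"
  | 'A' => some "AA" | 'a' => some "aa" | 'P' => some "h:mm aa"
  | 'D' => some "E" | 'l' => some "EEEE" | 'j' => some "d"
  | 'd' => some "dd" | 'n' => some "M" | 'm' => some "MM"
  | 'M' => some "MMM" | 'F' => some "MMMM" | 'y' => some "yy"
  | 'Y' => some "yyyy" | _ => none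
def pvTimeChars : PySem.Set Char := PySem.Set.ofList ['h', 'H', 'i', 'A', 'a', 'P']
def pvDateChars : PySem.Set Char := PySem.Set.ofList ['D', 'l', 'j', 'd', 'n', 'm', 'M', 'F', 'y', 'Y']
def pvFinalA (isTime : Bool) (curr dps tps : List String) : List String × List String :=
  if curr ≠ [] then
    if isTime then (dps, tps ++ [PySem.Str.join "" curr]) else (dps ++ [PySem.Str.join "" curr], tps)
  else (dps, tps)
def pvLoopA : List Char → Bool → List String → List String → List String → List String × List String
  | [], isTime, curr, dps, tps => pvFinalA isTime curr dps tps
  -- Python never returns here (the escape branch stops advancing at a final "\"): the port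
  -- returns the buckets unflushed to stay total; Pre_ below excludes these inputs.
  | ['\\'], _isTime, _curr, dps, tps => (dps, tps)
  | '\\' :: c :: rest, isTime, curr, dps, tps => pvLoopA rest isTime (curr ++ [c.toString]) dps tps
  | c :: rest, isTime, curr, dps, tps =>
    match pvFmtA c with
    | some m =>
      if c ∈ pvTimeChars then
        if curr ≠ [] ∧ isTime = false then
          pvLoopA rest true [m] (dps ++ [PySem.Str.join "" curr]) tps
        else pvLoopA rest true (curr ++ [m]) dps tps
      else if c ∈ pvDateChars then
        if curr ≠ [] ∧ isTime = true then
          pvLoopA rest false [m] dps (tps ++ [PySem.Str.join "" curr])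
        else pvLoopA rest false (curr ++ [m]) dps tps
      else pvLoopA rest isTime curr dps tps
    | none =>
      if c ∈ ['/', ':', '.', '-'] then pvLoopA rest isTime (curr ++ [c.toString]) dps tps
      else if c = ' ' then
        if curr ≠ [] then
          if isTime then pvLoopA rest isTime [" "] dps (tps ++ [PySem.Str.join "" curr])
          else pvLoopA rest isTime [" "] (dps ++ [PySem.Str.join "" curr]) tps
        else pvLoopA rest isTime [" "] dps tps
      else pvLoopA rest isTime curr dps tps

-- ' '.join(filter(None, s.split()))
def pvNormA (s : String) : String :=
  PySem.Str.join " " ((PySem.Str.split₀ s).filter (fun t => t ≠ ""))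

def django_to_airdatepicker_datetime_separated (django_format : String) : String × String :=
  match pvLoopA django_format.toList false [] [] [] with
  | (dps, tps) => (pvNormA (PySem.Str.join "" dps), pvNormA (PySem.Str.join "" tps))

-- ===== PORT B =====
inductive PvTag
  | date | time | sep | space
deriving DecidableEq, Repr
def pvMapB (c : Char) : Option (String × PvTag) :=
  match c with
  | 'h' => some ("hh", .time) | 'H' => some ("HH", .time)
  | 'i' => some ("mm", .time) | 'A' => some ("AA", .time)
  | 'a' => some ("aa", .time) | 'P' => some ("h:mm aa", .time)
  | 'D' => some ("E", .date) | 'l' => some ("EEEE", .date)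
  | 'j' => some ("d", .date) | 'd' => some ("dd", .date)
  | 'n' => some ("M", .date) | 'm' => some ("MM", .date)
  | 'M' => some ("MMM", .date) | 'F' => some ("MMMM", .date)
  | 'y' => some ("yy", .date) | 'Y' => some ("yyyy", .date)
  | '/' => some ("/", .sep) | ':' => some (":", .sep)
  | '.' => some (".", .sep) | '-' => some ("-", .sep)
  | ' ' => some (" ", .space)
  | _ => none
def pvTokB : List Char → List (String × PvTag)
  | [] => []
  | ['\\'] => []
  | '\\' :: c :: rest => (c.toString, PvTag.sep) :: pvTokB rest
  | c :: rest =>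
    match pvMapB c with
    | some t => t :: pvTokB rest
    | none => pvTokB rest
def pvFlushB (isTime : Bool) (part bd bt : List String) : List String × List String :=
  if isTime then (bd, bt ++ [PySem.Str.join "" part]) else (bd ++ [PySem.Str.join "" part], bt)
def pvRunB : List (String × PvTag) → Bool → List String → List String → List String → List String × List String
  | [], isTime, part, bd, bt => if part ≠ [] then pvFlushB isTime part bd bt else (bd, bt)
  | (text, tag) :: ts, isTime, part, bd, bt =>
    if tag = PvTag.sep then pvRunB ts isTime (part ++ [text]) bd bt
    else if tag = PvTag.space then
      if part ≠ [] then
        match pvFlushB isTime part bd bt with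
        | (bd', bt') => pvRunB ts isTime [" "] bd' bt'
      else pvRunB ts isTime [" "] bd bt
    else
      let wanted : Bool := decide (tag = PvTag.time)
      if part ≠ [] ∧ isTime ≠ wanted then
        match pvFlushB isTime part bd bt with
        | (bd', bt') => pvRunB ts wanted [text] bd' bt'
      else pvRunB ts wanted (part ++ [text]) bd bt

-- ' '.join(s.split())
def pvNormB (s : String) : String := PySem.Str.join " " (PySem.Str.split₀ s)

def django_to_airdatepicker_datetime_separated_alt (django_format : String) : String × String :=
  match pvRunB (pvTokB django_format.toList) false [] [] [] with
  | (bd, bt) => (pvNormB (PySem.Str.join "" bd), pvNormB (PySem.Str.join "" bt))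

-- ===== PRECONDITION & SPEC =====
def pvTrailEven (cs : List Char) : Prop :=
  (cs.reverse.takeWhile (fun c => c = '\\')).length % 2 = 0

-- Pre_ excludes exactly the strings whose trailing run of backslashes has odd length: on those
-- the Python A never returns (its escape branch stops advancing at a final "\", looping forever).
def Pre_django_to_airdatepicker_datetime_separated (django_format : String) : Prop :=
  pvTrailEven django_format.toList
instance (django_format : String) : Decidable (Pre_django_to_airdatepicker_datetime_separated django_format) := by unfold Pre_django_to_airdatepicker_datetime_separated pvTrailEven; infer_instance

def pvWitness_django_to_airdatepicker_datetime_separated : String := "d/m/Y H:i"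

def Spec_django_to_airdatepicker_datetime_separated (django_format : String) (out : String × String) : Prop := out = django_to_airdatepicker_datetime_separated_alt django_format
instance (django_format : String) (out : String × String) : Decidable (Spec_django_to_airdatepicker_datetime_separated django_format out) := by unfold Spec_django_to_airdatepicker_datetime_separated; infer_instance

-- ===== CLAIM (what is proved, stated in full; the proofs are below) =====
def Claim_equal_django_to_airdatepicker_datetime_separated : Prop := ∀ (django_format : String), Dom_django_to_airdatepicker_datetime_separated django_format → Pre_django_to_airdatepicker_datetime_separated django_format → Spec_django_to_airdatepicker_datetime_separated django_format (django_to_airdatepicker_datetime_separated django_format)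

-- ===== LEMMAS AND PROOFS =====

theorem pvMapB_time (c : Char) (m : String) (h : pvFmtA c = some m) (ht : c ∈ pvTimeChars) :
    pvMapB c = some (m, PvTag.time) := by
  unfold pvFmtA at h
  split at h <;> first | (injection h with hm; subst hm; revert ht; decide) | injection h
theorem pvMapB_date (c : Char) (m : String) (h : pvFmtA c = some m) (ht : c ∉ pvTimeChars) :
    c ∈ pvDateChars ∧ pvMapB c = some (m, PvTag.date) := by
  unfold pvFmtA at h
  split at h <;> first | (injection h with hm; subst hm; revert ht; decide) | injection h
theorem pvMapB_sep (c : Char) (h : pvFmtA c = none) (hs : c ∈ ['/', ':', '.', '-']) :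
    pvMapB c = some (c.toString, PvTag.sep) := by
  fin_cases hs <;> decide
theorem pvMapB_space : pvMapB ' ' = some (" ", PvTag.space) := by decide
theorem pvMapB_none (c : Char) (h : pvFmtA c = none) (hs : c ∉ ['/', ':', '.', '-'])
    (hsp : c ≠ ' ') : pvMapB c = none := by
  unfold pvFmtA at h
  split at h <;> try injection h
  unfold pvMapB
  split <;> simp_all

theorem pvTokB_cons (c : Char) (rest : List Char) (h : ¬ c = '\\') :
    pvTokB (c :: rest) = match pvMapB c with
      | some t => t :: pvTokB rest
      | none => pvTokB rest := by
  rw [pvTokB.eq_def]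
  split <;> simp_all

theorem pvTrailEven_single : ¬ pvTrailEven ['\\'] := by
  unfold pvTrailEven; decide
theorem pvTakeWhileFull (l : List Char) (hall : ∀ x ∈ l, x = '\\') :
    List.takeWhile (fun c => decide (c = '\\')) l = l :=
  List.takeWhile_eq_self_iff.mpr (by simpa [List.all_eq_true] using hall)
theorem pvTakeWhileNotFull (l : List Char) (hall : ¬ ∀ x ∈ l, x = '\\') :
    ¬ (List.takeWhile (fun c => decide (c = '\\')) l).length = l.length := by
  intro heq
  have := (List.takeWhile_prefix (l := l) (fun c => decide (c = '\\'))).eq_of_length heq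
  exact hall (by simpa [List.all_eq_true] using List.takeWhile_eq_self_iff.mp this)
theorem pvTrailEven_tail (c : Char) (rest : List Char) (h : ¬ c = '\\')
    (hp : pvTrailEven (c :: rest)) : pvTrailEven rest := by
  unfold pvTrailEven at *
  rw [List.reverse_cons, List.takeWhile_append] at hp
  by_cases hall : ∀ x ∈ rest, x = '\\'
  · have hall' : ∀ x ∈ rest.reverse, x = '\\' := by simpa using hall
    rw [if_pos (by rw [pvTakeWhileFull _ hall'])] at hp
    rw [pvTakeWhileFull _ hall']
    simp [h] at hp
    simpa using hp
  · rw [if_neg (pvTakeWhileNotFull _ (by simpa using hall))] at hp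
    exact hp
theorem pvTrailEven_tail2 (c : Char) (rest : List Char)
    (hp : pvTrailEven ('\\' :: c :: rest)) : pvTrailEven rest := by
  unfold pvTrailEven at *
  rw [List.reverse_cons, List.reverse_cons, List.append_assoc, List.takeWhile_append] at hp
  by_cases hall : ∀ x ∈ rest, x = '\\'
  · have hall' : ∀ x ∈ rest.reverse, x = '\\' := by simpa using hall
    rw [if_pos (by rw [pvTakeWhileFull _ hall'])] at hp
    rw [pvTakeWhileFull _ hall']
    by_cases hc : c = '\\'
    · subst hc; simp at hp; simp; omega
    · simp [hc] at hp; simpa using hp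
  · rw [if_neg (pvTakeWhileNotFull _ (by simpa using hall))] at hp
    exact hp

theorem pvLoopA_eq_pvRunB (cs : List Char) (isTime : Bool) (curr dps tps : List String)
    (hp : pvTrailEven cs) :
      pvLoopA cs isTime curr dps tps = pvRunB (pvTokB cs) isTime curr dps tps := by
  induction cs, isTime, curr, dps, tps using pvLoopA.induct with
  | case1 isTime curr dps tps =>
      simp [pvLoopA, pvTokB, pvRunB, pvFinalA, pvFlushB]
  | case2 isTime curr dps tps =>
      exact absurd hp pvTrailEven_single
  | case3 c rest isTime curr dps tps ih =>
      have ih := ih (pvTrailEven_tail2 c rest hp)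
      simp [pvLoopA, pvTokB, pvRunB]
      simpa using ih
  | case4 c rest isTime curr dps tps hb1 hb2 m hfmt htc hcond ih =>
      have hc : ¬ c = '\\' := fun hh => by cases rest with
        | nil => exact hb1 hh rfl
        | cons a b => exact hb2 a b hh rfl
      have ih := ih (pvTrailEven_tail c rest hc hp)
      rw [pvTokB_cons c rest hc, pvMapB_time c m hfmt htc]
      simp [pvLoopA, hfmt, htc, hcond.1, hcond.2, pvRunB, pvFlushB, ih]
  | case5 c rest isTime curr dps tps hb1 hb2 m hfmt htc hcond ih =>
      have hc : ¬ c = '\\' := fun hh => by cases rest with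
        | nil => exact hb1 hh rfl
        | cons a b => exact hb2 a b hh rfl
      have ih := ih (pvTrailEven_tail c rest hc hp)
      rw [pvTokB_cons c rest hc, pvMapB_time c m hfmt htc]
      simp only [not_and, ne_eq] at hcond
      simp [pvLoopA, hfmt, htc, pvRunB, pvFlushB, ih]
      have hno : ¬(¬curr = [] ∧ isTime = false) := fun h => hcond h.1 h.2
      rw [if_neg hno, if_neg hno]
  | case6 c rest isTime curr dps tps hb1 hb2 m hfmt htc hdc hcond ih =>
      have hc : ¬ c = '\\' := fun hh => by cases rest with
        | nil => exact hb1 hh rfl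
        | cons a b => exact hb2 a b hh rfl
      have ih := ih (pvTrailEven_tail c rest hc hp)
      rw [pvTokB_cons c rest hc, (pvMapB_date c m hfmt htc).2]
      simp [pvLoopA, hfmt, htc, hdc, hcond.1, hcond.2, pvRunB, pvFlushB, ih]
  | case7 c rest isTime curr dps tps hb1 hb2 m hfmt htc hdc hcond ih =>
      have hc : ¬ c = '\\' := fun hh => by cases rest with
        | nil => exact hb1 hh rfl
        | cons a b => exact hb2 a b hh rfl
      have ih := ih (pvTrailEven_tail c rest hc hp)
      rw [pvTokB_cons c rest hc, (pvMapB_date c m hfmt htc).2]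
      simp only [not_and, ne_eq] at hcond
      simp [pvLoopA, hfmt, htc, hdc, pvRunB, pvFlushB, ih]
      have hno : ¬(¬curr = [] ∧ isTime = true) := fun h => hcond h.1 h.2
      rw [if_neg hno, if_neg hno]
  | case8 c rest isTime curr dps tps hb1 hb2 m hfmt htc hdc ih =>
      exact absurd (pvMapB_date c m hfmt htc).1 hdc
  | case9 c rest isTime curr dps tps hb1 hb2 hfmt hsep ih =>
      have hc : ¬ c = '\\' := fun hh => by cases rest with
        | nil => exact hb1 hh rfl
        | cons a b => exact hb2 a b hh rfl
      have ih := ih (pvTrailEven_tail c rest hc hp)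
      rw [pvTokB_cons c rest hc, pvMapB_sep c hfmt hsep]
      simp [pvLoopA, hfmt, hsep, pvRunB]
      simpa using ih
  | case10 rest curr dps tps hcur hb1 hb2 hfmt hsep ih =>
      have ih := ih (pvTrailEven_tail ' ' rest (by decide) hp)
      rw [pvTokB_cons ' ' rest (by decide), pvMapB_space]
      simp [pvLoopA, hfmt, hsep, hcur, pvRunB, pvFlushB, ih]
  | case11 rest isTime curr dps tps hcur hnt hb1 hb2 hfmt hsep ih =>
      simp only [Bool.not_eq_true] at hnt
      subst hnt
      have ih := ih (pvTrailEven_tail ' ' rest (by decide) hp)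
      rw [pvTokB_cons ' ' rest (by decide), pvMapB_space]
      simp [pvLoopA, hfmt, hsep, hcur, pvRunB, pvFlushB, ih]
  | case12 rest isTime curr dps tps hcur hb1 hb2 hfmt hsep ih =>
      have ih := ih (pvTrailEven_tail ' ' rest (by decide) hp)
      rw [pvTokB_cons ' ' rest (by decide), pvMapB_space]
      simp only [not_not] at hcur
      simp [pvLoopA, hfmt, hsep, hcur, pvRunB, ih]
  | case13 c rest isTime curr dps tps hb1 hb2 hfmt hsep hsp ih =>
      have hc : ¬ c = '\\' := fun hh => by cases rest with
        | nil => exact hb1 hh rfl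
        | cons a b => exact hb2 a b hh rfl
      have ih := ih (pvTrailEven_tail c rest hc hp)
      rw [pvTokB_cons c rest hc, pvMapB_none c hfmt hsep hsp]
      simp [pvLoopA, hfmt, hsep, hsp, ih]
theorem pvGo_ne_nil (cs : List Char) : ∀ (cur : List Char) (acc : List (List Char)),
    (∀ x ∈ acc, x ≠ []) → ∀ x ∈ PySem.Chars.split₀.go cs cur acc, x ≠ [] := by
  induction cs with
  | nil =>
      intro cur acc hacc x hx
      unfold PySem.Chars.split₀.go at hx
      split at hx
      · exact hacc x (List.mem_reverse.mp hx)
      · rcases List.mem_cons.mp (List.mem_reverse.mp hx) with h | h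
        · subst h; simp_all [List.isEmpty_iff]
        · exact hacc x h
  | cons c rest ih =>
      intro cur acc hacc x hx
      unfold PySem.Chars.split₀.go at hx
      split at hx
      · split at hx
        · exact ih [] acc hacc x hx
        · refine ih [] (cur.reverse :: acc) ?_ x hx
          intro y hy
          rcases List.mem_cons.mp hy with h | h
          · simp_all [List.isEmpty_iff]
          · exact hacc y h
      · exact ih (c :: cur) acc hacc x hx
theorem pvSplit0_ne_nil (s : String) : ∀ t ∈ PySem.Str.split₀ s, t ≠ "" := by
  intro t ht
  unfold PySem.Str.split₀ at ht
  rcases List.mem_map.mp ht with ⟨x, hx, rfl⟩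
  have hx' := pvGo_ne_nil s.toList [] [] (by simp) x hx
  intro hc
  apply hx'
  have := congrArg String.toList hc
  simpa using this

theorem pvNormA_eq_pvNormB (s : String) : pvNormA s = pvNormB s := by
  unfold pvNormA pvNormB
  congr 1
  exact List.filter_eq_self.mpr (fun a ha => by simpa using pvSplit0_ne_nil s a ha)

-- ===== VERDICT (by name: the statement is the Claim_ definition above) =====
theorem django_to_airdatepicker_datetime_separated_spec : Claim_equal_django_to_airdatepicker_datetime_separated := by
  intro s _ hpre
  unfold Spec_django_to_airdatepicker_datetime_separated
  unfold django_to_airdatepicker_datetime_separated django_to_airdatepicker_datetime_separated_alt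
  rw [pvLoopA_eq_pvRunB s.toList false [] [] [] hpre]
  cases pvRunB (pvTokB s.toList) false [] [] [] with
  | mk bd bt => simp [pvNormA_eq_pvNormB]
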